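-- pv_equiv track=rewrite | github.com/dimas-defender/BMSTU | Modeling/sem7/lab2/main.py | getCoeffs
-- ===== SOURCE A (Python) =====
-- def getCoeffs(matrix):
--     n = len(matrix)
--     lst = [[None for j in range(n)] for i in range(n)]
--
--     for i in range(n):
--         if i != (n - 1):
--             for j in range(n):
--                 if j != i:
--                     lst[i][j] = matrix[j][i]
--                 else:
--                     lst[i][j] = -sum(matrix[i])
--         else:
--             for j in range(n):
--                 lst[i][j] = 1
--     return lst
-- ===== SOURCE B (Python) =====
-- def getCoeffs(matrix):
--     # Column-major build: each output column j is matrix row j truncated to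
--     # n-1 entries plus a trailing 1; patch diagonals with negated row sums,
--     # then transpose the columns with zip to obtain the rows.
--     n = len(matrix)
--     cols = [matrix[j][:n-1] + [1] for j in range(n)]
--     for j in range(n - 1):
--         cols[j][j] = -sum(matrix[j])
--     return [list(r) for r in zip(*cols)]
-- ===== Notes on version B (the rewrite author's own statement) =====
-- stated objective: alternative
-- what changed: B builds the result column-major — each output column is the matrix row sliced to n-1 entries plus a trailing 1, diagonals are patched with negated row sums in a second pass, and the columns are transposed with zip(*cols) — instead of A's row-major per-element if/else fill of a preallocated n-by-n grid.
-- outside the precondition, e.g. on getCoeffs([[], [1, 2]]): A returns [[0, 1], [1, 1]], B returns [[0, 1]]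
import Mathlib
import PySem

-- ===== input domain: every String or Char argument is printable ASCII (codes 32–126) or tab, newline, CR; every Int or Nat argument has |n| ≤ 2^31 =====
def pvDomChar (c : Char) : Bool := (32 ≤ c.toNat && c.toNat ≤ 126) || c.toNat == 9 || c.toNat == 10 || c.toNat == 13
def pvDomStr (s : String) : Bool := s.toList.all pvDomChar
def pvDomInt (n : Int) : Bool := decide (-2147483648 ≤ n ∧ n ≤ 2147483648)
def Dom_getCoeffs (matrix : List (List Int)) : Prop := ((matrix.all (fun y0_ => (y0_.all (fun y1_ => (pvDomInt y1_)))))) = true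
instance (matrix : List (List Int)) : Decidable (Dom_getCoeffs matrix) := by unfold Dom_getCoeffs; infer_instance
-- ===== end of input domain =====

-- B builds the result column-major (sliced matrix rows plus a trailing 1, diagonal
-- patched in a second pass, then a zip(*cols) transpose) instead of A's row-major
-- per-element branching fill; objective: alternative algorithm of the same cost.

-- ===== PORT A =====
-- n = len(matrix) is written inline as (matrix.length : Int)
def getCoeffs (matrix : List (List Int)) : List (List Int) :=
  (PySem.List.pyRange 0 (matrix.length : Int) 1).map (fun i =>
    if i ≠ (matrix.length : Int) - 1 then
      (PySem.List.pyRange 0 (matrix.length : Int) 1).map (fun j =>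
        if j ≠ i then PySem.List.pyGetD (PySem.List.pyGetD matrix j []) i 0
        else -((PySem.List.pyGetD matrix i []).sum))
    else
      (PySem.List.pyRange 0 (matrix.length : Int) 1).map (fun _ => (1 : Int)))

-- ===== PORT B =====
-- zip(*cols), ported by hand step for step: emit a row of heads while every column
-- is nonempty, recursing on the tails (exact: zip stops at the shortest column).
def pyZipGo : List Int → List (List Int) → List (List Int)
  | [], _ => []
  | x :: c, cs =>
    if cs.all (fun l => !l.isEmpty) then
      (x :: cs.map (fun l => l.headD 0)) :: pyZipGo c (cs.map List.tail)
    else []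

def pyZipStar : List (List Int) → List (List Int)
  | [] => []
  | c :: cs => pyZipGo c cs

-- cols[j][j] = v; exact for the nonnegative in-range j produced by range(0, n-1)
-- on inputs satisfying Pre_ (Python would raise IndexError out of range).
def setCell (cs : List (List Int)) (j : Int) (v : Int) : List (List Int) :=
  cs.set j.toNat ((cs.getD j.toNat []).set j.toNat v)

-- n = len(matrix) inline; the final [list(r) for r in zip(*cols)] only converts
-- tuples to lists, which is the identity here.
def getCoeffs_alt (matrix : List (List Int)) : List (List Int) :=
  pyZipStar
    ((PySem.List.pyRange 0 ((matrix.length : Int) - 1) 1).foldl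
      (fun cs j => setCell cs j (-((PySem.List.pyGetD matrix j []).sum)))
      ((PySem.List.pyRange 0 (matrix.length : Int) 1).map (fun j =>
        PySem.List.slice (PySem.List.pyGetD matrix j []) none (some ((matrix.length : Int) - 1))
          ++ [(1 : Int)])))

-- ===== PRECONDITION & SPEC =====
-- Pre_ excludes ragged matrices with a row shorter than n-1: on those A (and usually B)
-- raises IndexError, except when only row n-2 is short, where A still returns but B's
-- zip transpose truncates the output (a defensible behaviour on a malformed matrix).
def Pre_getCoeffs (matrix : List (List Int)) : Prop :=
  ∀ j < matrix.length, matrix.length - 1 ≤ (matrix.getD j []).length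
instance (matrix : List (List Int)) : Decidable (Pre_getCoeffs matrix) := by unfold Pre_getCoeffs; infer_instance

def pvWitness_getCoeffs : List (List Int) := [[1, 2], [3, 4]]

def Spec_getCoeffs (matrix : List (List Int)) (out : List (List Int)) : Prop := out = getCoeffs_alt matrix
instance (matrix : List (List Int)) (out : List (List Int)) : Decidable (Spec_getCoeffs matrix out) := by unfold Spec_getCoeffs; infer_instance

-- ===== CLAIM (what is proved, stated in full; the proofs are below) =====
def Claim_equal_getCoeffs : Prop := ∀ (matrix : List (List Int)), Dom_getCoeffs matrix → Pre_getCoeffs matrix → Spec_getCoeffs matrix (getCoeffs matrix)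

-- ===== LEMMAS AND PROOFS =====

theorem getD_tail (l : List Int) (i : Nat) (d : Int) : l.tail.getD i d = l.getD (i + 1) d := by
  cases l <;> simp [List.getD]

theorem headD_eq_getD (l : List Int) (d : Int) : l.headD d = l.getD 0 d := by
  cases l <;> simp [List.getD]

-- zip(*cols) on a nonempty family of columns of equal length m is the transpose.
theorem pyZipStar_uniform (m : Nat) : ∀ (cols : List (List Int)), cols ≠ [] →
    (∀ c ∈ cols, c.length = m) →
    pyZipStar cols = (List.range m).map (fun i => cols.map (fun c => c.getD i 0)) := by
  induction m with
  | zero =>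
    intro cols hne hlen
    obtain ⟨c, cs, rfl⟩ := List.exists_cons_of_ne_nil hne
    cases c with
    | nil => simp [pyZipStar, pyZipGo]
    | cons y c2 =>
      have := hlen (y :: c2) (by simp)
      simp at this
  | succ m ih =>
    intro cols hne hlen
    obtain ⟨c, cs, rfl⟩ := List.exists_cons_of_ne_nil hne
    obtain ⟨x, c', rfl⟩ : ∃ x c', c = x :: c' := by
      cases c with
      | nil => exact absurd (hlen [] (by simp)) (by simp)
      | cons x c' => exact ⟨x, c', rfl⟩
    have hall : cs.all (fun l => !l.isEmpty) = true := by
      rw [List.all_eq_true]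
      intro l hl
      have := hlen l (by simp [hl])
      cases l with
      | nil => simp at this
      | cons _ _ => simp
    have hstep : pyZipStar ((x :: c') :: cs) =
        (x :: cs.map (fun l => l.headD 0)) :: pyZipGo c' (cs.map List.tail) := by
      simp [pyZipStar, pyZipGo, hall]
    have htails : pyZipGo c' (cs.map List.tail) = pyZipStar (((x :: c') :: cs).map List.tail) := by
      simp [pyZipStar]
    have ihres := ih (((x :: c') :: cs).map List.tail) (by simp)
      (by
        intro c hc
        rw [List.mem_map] at hc
        obtain ⟨l, hl, rfl⟩ := hc
        have := hlen l hl
        simp [List.length_tail, this])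
    rw [hstep, htails, ihres, List.range_succ_eq_map]
    simp only [List.map_cons, List.map_map, Function.comp_def, List.tail_cons]
    congr 1
    · congr 1
      apply List.map_congr_left
      intro l _
      exact headD_eq_getD l 0
    · apply List.map_congr_left
      intro i _
      congr 1
      apply List.map_congr_left
      intro l _
      exact getD_tail l i 0

-- one in-range setCell on a map over List.range, described pointwise
theorem setCell_map_range (L m : Nat) (F : Nat → List Int) (v : Int) (hm : m < L) :
    setCell ((List.range L).map F) (m : Int) v
      = (List.range L).map (fun j => if j = m then (F m).set m v else F j) := by
  unfold setCell
  rw [Int.toNat_natCast]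
  rw [PySem.List.getD_map_range F L m _ hm]
  apply List.ext_getElem
  · simp
  · intro k h1 h2
    simp only [List.getElem_set, List.getElem_map, List.getElem_range]
    by_cases hk : m = k
    · subst hk; simp
    · rw [if_neg hk, if_neg (by omega)]

-- the diagonal-patch loop, rolled out over a map on List.range
theorem foldl_setCell (L : Nat) (f : Nat → List Int) (gI : Int → Int) :
    ∀ (m : Nat), m ≤ L →
    (PySem.List.pyRange 0 (m : Int) 1).foldl (fun cs j => setCell cs j (gI j)) ((List.range L).map f)
      = (List.range L).map (fun j => if j < m then (f j).set j (gI (j : Int)) else f j) := by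
  intro m
  induction m with
  | zero =>
    intro _
    rw [PySem.List.pyRange_one_eq_nil (by omega)]
    simp
  | succ m ih =>
    intro hm
    have h1 : ((m + 1 : Nat) : Int) = (m : Int) + 1 := by push_cast; ring
    rw [h1, PySem.List.pyRange_one_succ_right (by positivity), List.foldl_append,
        ih (by omega)]
    simp only [List.foldl_cons, List.foldl_nil]
    rw [setCell_map_range L m _ (gI (m : Int)) (by omega)]
    apply List.map_congr_left
    intro j hj
    rw [List.mem_range] at hj
    by_cases hjm : j = m
    · subst hjm
      rw [if_pos rfl, if_neg (by omega), if_pos (by omega)]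
    · rw [if_neg hjm]
      by_cases hlt : j < m
      · rw [if_pos hlt, if_pos (by omega)]
      · rw [if_neg hlt, if_neg (by omega)]

-- entries of an (unpatched) column: sliced row plus trailing 1
theorem getD_col (x : List Int) (K i : Nat) (hx : K ≤ x.length) (hi : i ≤ K) :
    (x.take K ++ [(1 : Int)]).getD i 0 = if i < K then x.getD i 0 else 1 := by
  rcases lt_or_ge i K with h | h
  · rw [if_pos h]
    rw [List.getD_eq_getElem?_getD, List.getD_eq_getElem?_getD,
        List.getElem?_append_left (by rw [List.length_take]; omega), List.getElem?_take, if_pos h]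
  · rw [if_neg (by omega)]
    have hlen : (x.take K).length = K := by rw [List.length_take]; omega
    have hiK : i = K := by omega
    rw [hiK, List.getD_eq_getElem?_getD, List.getElem?_append_right hlen.le, hlen]
    simp

theorem main_eq (matrix : List (List Int)) (hP : Pre_getCoeffs matrix) :
    getCoeffs matrix = getCoeffs_alt matrix := by
  cases hL : matrix.length with
  | zero =>
    cases matrix with
    | nil => rfl
    | cons r rs => simp at hL
  | succ K =>
    have hK1 : ((matrix.length : Int) - 1) = ((K : Nat) : Int) := by rw [hL]; push_cast; ring
    -- columns before the patch
    set f : Nat → List Int := fun j => (matrix.getD j []).take K ++ [(1 : Int)] with hf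
    have hcols0 : (PySem.List.pyRange 0 (matrix.length : Int) 1).map (fun j =>
        PySem.List.slice (PySem.List.pyGetD matrix j []) none (some ((matrix.length : Int) - 1))
          ++ [(1 : Int)]) = (List.range (K + 1)).map f := by
      rw [hK1, PySem.List.pyRange_zero_natCast, List.map_map, hL]
      apply List.map_congr_left
      intro j _
      simp only [Function.comp]
      rw [PySem.List.pyGetD_natCast, PySem.List.slice_to_natCast]
    -- columns after the patch
    set h : Nat → List Int := fun j =>
      if j < K then (f j).set j (-((matrix.getD j []).sum)) else f j with hh
    have hcolsP : getCoeffs_alt matrix = pyZipStar ((List.range (K + 1)).map h) := by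
      unfold getCoeffs_alt
      rw [hcols0, hK1]
      rw [foldl_setCell (K + 1) f (fun j => -((PySem.List.pyGetD matrix j []).sum)) K (by omega)]
      congr 1
      apply List.map_congr_left
      intro j _
      by_cases hj : j < K
      · rw [hh]; simp only [if_pos hj]
        rw [PySem.List.pyGetD_natCast]
      · rw [hh]; simp only [if_neg hj]
    -- row lengths admitted by Pre_
    have hrow : ∀ j, j < K + 1 → K ≤ (matrix.getD j []).length := by
      intro j hj
      have := hP j (by omega)
      omega
    have hlenh : ∀ c ∈ (List.range (K + 1)).map h, c.length = K + 1 := by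
      intro c hc
      rw [List.mem_map] at hc
      obtain ⟨j, hj, rfl⟩ := hc
      rw [List.mem_range] at hj
      have hfl : (f j).length = K + 1 := by
        rw [hf]
        simp only [List.length_append, List.length_take, List.length_cons, List.length_nil]
        have := hrow j hj
        omega
      rw [hh]
      by_cases hjk : j < K <;> simp [hjk, hfl]
    -- transpose
    have hzip : getCoeffs_alt matrix =
        (List.range (K + 1)).map (fun i => (List.range (K + 1)).map (fun j => (h j).getD i 0)) := by
      rw [hcolsP, pyZipStar_uniform (K + 1) _ (by simp) hlenh]
      simp only [List.map_map, Function.comp_def]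
    -- entry of the patched column j at row i
    have hentry : ∀ i j, i < K + 1 → j < K + 1 →
        (h j).getD i 0 =
          if i < K then (if j ≠ i then (matrix.getD j []).getD i 0 else -((matrix.getD j []).sum))
          else 1 := by
      intro i j hi hj
      have hx := hrow j hj
      rw [hh]
      by_cases hjk : j < K
      · simp only [if_pos hjk]
        rw [List.getD_eq_getElem?_getD, List.getElem?_set]
        by_cases hij : j = i
        · subst hij
          rw [if_pos rfl, if_pos (by
            rw [hf]
            simp only [List.length_append, List.length_take, List.length_cons, List.length_nil]
            omega)]
          simp only [Option.getD_some]
          rw [if_pos hjk, if_neg (by omega)]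
        · rw [if_neg hij, ← List.getD_eq_getElem?_getD, hf]
          rw [getD_col _ K i hx (by omega)]
          rcases lt_or_ge i K with hik | hik
          · rw [if_pos hik, if_pos hik, if_pos (by omega)]
          · rw [if_neg (by omega), if_neg (by omega)]
      · simp only [if_neg hjk]
        rw [hf, getD_col _ K i hx (by omega)]
        rcases lt_or_ge i K with hik | hik
        · rw [if_pos hik, if_pos hik, if_pos (by omega)]
        · rw [if_neg (by omega), if_neg (by omega)]
    -- A, rolled out over List.range, matches entrywise
    rw [hzip]
    unfold getCoeffs
    rw [hL, PySem.List.pyRange_zero_natCast, List.map_map]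
    apply List.map_congr_left
    intro i hi
    rw [List.mem_range] at hi
    simp only [Function.comp_def]
    by_cases hik : i < K
    · rw [if_pos (show ((i : Nat) : Int) ≠ ((K + 1 : Nat) : Int) - 1 by push_cast; omega)]
      rw [List.map_map]
      apply List.map_congr_left
      intro j hj
      rw [List.mem_range] at hj
      simp only [Function.comp_def]
      rw [hentry i j hi hj, if_pos hik]
      by_cases hji : j = i
      · subst hji
        rw [if_neg (by omega), if_neg (by omega), PySem.List.pyGetD_natCast]
      · rw [if_pos (show ((j : Nat) : Int) ≠ ((i : Nat) : Int) by omega), if_pos hji,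
            PySem.List.pyGetD_natCast, PySem.List.pyGetD_natCast]
    · rw [if_neg (show ¬ ((i : Nat) : Int) ≠ ((K + 1 : Nat) : Int) - 1 by push_cast; omega)]
      rw [List.map_map]
      apply List.map_congr_left
      intro j hj
      rw [List.mem_range] at hj
      simp only [Function.comp_def]
      rw [hentry i j hi hj, if_neg hik]

-- ===== VERDICT (by name: the statement is the Claim_ definition above) =====
theorem getCoeffs_spec : Claim_equal_getCoeffs := by
  intro matrix _ hP
  exact main_eq matrix hP
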